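-- pv_equiv track=rewrite | github.com/jun048098/codingtest | 카카오인턴/d.py | solution
-- ===== SOURCE A (Python) =====
-- def solution(rc, operations):
--     for oper in operations:
--         if oper == "ShiftRow":
--             rc.insert(0, rc.pop())
--
--         if oper == "Rotate":
--             for j in range(len(rc)-1,0,-1):
--                 rc[j].append(rc[j-1].pop())
--
--             for k in range(len(rc)-1):
--                 rc[k].insert(0, rc[k+1].pop(0))
--
--     return rc
-- ===== SOURCE B (Python) =====
-- def solution(rc, operations):
--     grid = rc
--     for oper in operations:
--         if oper == "ShiftRow":
--             grid = grid[-1:] + grid[:-1]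
--         elif oper == "Rotate" and len(grid) >= 2 and len(grid[0]) >= 2:
--             n = len(grid)
--             first = [grid[1][0]] + grid[0][:-1]
--             middle = [[grid[i + 1][0]] + grid[i][1:-1] + [grid[i - 1][-1]]
--                       for i in range(1, n - 1)]
--             last = grid[n - 1][1:] + [grid[n - 2][-1]]
--             grid = [first] + middle + [last]
--     return grid
-- ===== Notes on version B (the rewrite author's own statement) =====
-- stated objective: alternative
-- what changed: A performs Rotate as two sequential in-place column-shift loops of pops/appends/inserts over the row lists; B builds the rotated matrix in one functional pass, constructing each new row directly from its neighbours' border cells, and keeps ShiftRow as a slice concatenation.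
-- outside the precondition, e.g. on solution([], ['ShiftRow']): A raises IndexError, B returns []; on solution([[1], [2], [3]], ['Rotate']): A returns [[1], [3], [2]], B returns [[1], [2], [3]]; on solution([[1], [2, 3]], ['Rotate']): A returns [[2], [3, 1]], B returns [[1], [2, 3]]
import Mathlib
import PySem

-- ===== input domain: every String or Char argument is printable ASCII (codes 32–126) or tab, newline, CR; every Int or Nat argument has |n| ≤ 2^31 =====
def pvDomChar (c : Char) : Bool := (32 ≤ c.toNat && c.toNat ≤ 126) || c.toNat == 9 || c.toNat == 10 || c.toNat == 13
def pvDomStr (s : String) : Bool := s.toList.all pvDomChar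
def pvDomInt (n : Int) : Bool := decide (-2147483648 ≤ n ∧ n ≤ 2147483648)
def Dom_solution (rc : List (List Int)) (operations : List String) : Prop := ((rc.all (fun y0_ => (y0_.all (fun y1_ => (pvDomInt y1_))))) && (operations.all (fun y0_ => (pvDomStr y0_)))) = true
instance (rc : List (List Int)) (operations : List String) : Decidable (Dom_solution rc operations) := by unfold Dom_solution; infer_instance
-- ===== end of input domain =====

-- B replaces A's two in-place border-column shift loops (pops/appends/inserts on the row
-- lists) by building each new row directly from its neighbours in one functional pass;
-- B does not mutate its argument while A rearranges rc and its rows in place (the claim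
-- is about the return value only).  Objective: alternative decomposition, no speed claim.

-- ===== PORT A =====
-- rc[j].append(rc[j-1].pop())  (a row's pop() on an empty row raises IndexError in
-- Python: those inputs are outside Pre_solution; the .getD defaults are never reached there)
def aStep1 (g : List (List Int)) (j : Int) : List (List Int) :=
  let row := PySem.List.pyGetD g (j - 1) []
  let p := row.getLast?.getD 0
  let g1 := PySem.List.pySetD g (j - 1) row.dropLast
  PySem.List.pySetD g1 j (PySem.List.pyGetD g1 j [] ++ [p])

-- rc[k].insert(0, rc[k+1].pop(0))
def aStep2 (g : List (List Int)) (k : Int) : List (List Int) :=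
  let row := PySem.List.pyGetD g (k + 1) []
  let p := row.head?.getD 0
  let g1 := PySem.List.pySetD g (k + 1) row.tail
  PySem.List.pySetD g1 k (p :: PySem.List.pyGetD g1 k [])

def aOp (g : List (List Int)) (oper : String) : List (List Int) :=
  let g :=
    if oper = "ShiftRow" then
      -- rc.insert(0, rc.pop()) ; rc.pop() on an empty rc raises IndexError (outside Pre_solution)
      match g.getLast? with
      | some r => r :: g.dropLast
      | none => g
    else g
  if oper = "Rotate" then
    let g1 := (PySem.List.pyRange ((g.length : Int) - 1) 0 (-1)).foldl aStep1 g
    (PySem.List.pyRange 0 ((g1.length : Int) - 1) 1).foldl aStep2 g1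
  else g

def solution (rc : List (List Int)) (operations : List String) : List (List Int) :=
  operations.foldl aOp rc

-- ===== PORT B =====
def bRotate (g : List (List Int)) : List (List Int) :=
  let n : Int := (g.length : Int)
  let first := PySem.List.pyGetD (PySem.List.pyGetD g 1 []) 0 0 ::
               PySem.List.slice (PySem.List.pyGetD g 0 []) none (some (-1))
  let middle := (PySem.List.pyRange 1 (n - 1) 1).map (fun i =>
      PySem.List.pyGetD (PySem.List.pyGetD g (i + 1) []) 0 0 ::
      (PySem.List.slice (PySem.List.pyGetD g i []) (some 1) (some (-1)) ++
       [PySem.List.pyGetD (PySem.List.pyGetD g (i - 1) []) (-1) 0]))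
  let last := PySem.List.slice (PySem.List.pyGetD g (n - 1) []) (some 1) none ++
              [PySem.List.pyGetD (PySem.List.pyGetD g (n - 2) []) (-1) 0]
  first :: (middle ++ [last])

def bOp (g : List (List Int)) (oper : String) : List (List Int) :=
  if oper = "ShiftRow" then
    PySem.List.slice g (some (-1)) none ++ PySem.List.slice g none (some (-1))
  else if oper = "Rotate" ∧ 2 ≤ g.length ∧ 2 ≤ (PySem.List.pyGetD g 0 []).length then
    bRotate g
  else g

def solution_alt (rc : List (List Int)) (operations : List String) : List (List Int) :=
  operations.foldl bOp rc

-- ===== PRECONDITION & SPEC =====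
-- Pre_ excludes (a) an empty rc together with a "ShiftRow" op, where A raises IndexError,
-- and (b) matrices of height ≥ 2 containing a row shorter than 2 together with a "Rotate"
-- op: there the border is degenerate, A's pop/append shuffling and B's no-op are equally
-- accidental readings of "rotate the outer border" (the original problem guarantees
-- both dimensions ≥ 2).
def Pre_solution (rc : List (List Int)) (operations : List String) : Prop :=
  ("ShiftRow" ∈ operations → rc ≠ []) ∧
  ("Rotate" ∈ operations → rc.length ≤ 1 ∨ ∀ r ∈ rc, 2 ≤ r.length)
instance (rc : List (List Int)) (operations : List String) : Decidable (Pre_solution rc operations) := by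
  unfold Pre_solution; infer_instance

def pvWitness_solution : List (List Int) × List String :=
  ([[1, 2], [3, 4], [5, 6]], ["Rotate", "ShiftRow", "Rotate"])

def Spec_solution (rc : List (List Int)) (operations : List String) (out : List (List Int)) : Prop := out = solution_alt rc operations
instance (rc : List (List Int)) (operations : List String) (out : List (List Int)) : Decidable (Spec_solution rc operations out) := by unfold Spec_solution; infer_instance

-- ===== CLAIM (what is proved, stated in full; the proofs are below) =====
def Claim_equal_solution : Prop := ∀ (rc : List (List Int)) (operations : List String), Dom_solution rc operations → Pre_solution rc operations → Spec_solution rc operations (solution rc operations)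

-- ===== LEMMAS AND PROOFS =====

-- row access / row pieces used by the characterizations
def rowAt (g : List (List Int)) (i : Nat) : List Int := g.getD i []
def lastD (r : List Int) : Int := r.getLast?.getD 0
def headD (r : List Int) : Int := r.head?.getD 0

-- state of A's first Rotate loop after the steps j = t, t-1, …, 1
def row1 (g : List (List Int)) (t i : Nat) : List Int :=
  if t = 0 then rowAt g i
  else if i = 0 then (rowAt g 0).dropLast
  else if i < t then (rowAt g i).dropLast ++ [lastD (rowAt g (i - 1))]
  else if i = t then rowAt g i ++ [lastD (rowAt g (i - 1))]
  else rowAt g i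

-- state of A's second Rotate loop after the steps k = 0, 1, …, t-1
def row2 (g : List (List Int)) (t i : Nat) : List Int :=
  if t = 0 then rowAt g i
  else if i < t then headD (rowAt g (i + 1)) :: (if i = 0 then rowAt g 0 else (rowAt g i).tail)
  else if i = t then (rowAt g i).tail
  else rowAt g i

theorem getD_set (l : List (List Int)) (i j : Nat) (a : List Int) :
    (l.set i a).getD j [] = if i = j then (if i < l.length then a else l.getD j []) else l.getD j [] := by
  simp [List.getD, List.getElem?_set]; split_ifs with h1 h2 <;> simp_all

theorem aStep1_len (g : List (List Int)) (j : Int) : (aStep1 g j).length = g.length := by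
  simp [aStep1, PySem.List.length_pySetD]

theorem foldl1_len (l : List Int) (g : List (List Int)) : (l.foldl aStep1 g).length = g.length := by
  induction l generalizing g with
  | nil => rfl
  | cons x xs ih => simp [List.foldl_cons, ih, aStep1_len]

theorem aStep2_len (g : List (List Int)) (j : Int) : (aStep2 g j).length = g.length := by
  simp [aStep2, PySem.List.length_pySetD]

theorem foldl2_len (l : List Int) (g : List (List Int)) : (l.foldl aStep2 g).length = g.length := by
  induction l generalizing g with
  | nil => rfl
  | cons x xs ih => simp [List.foldl_cons, ih, aStep2_len]

theorem aStep1_rowAt (g : List (List Int)) (t : Nat) (h1 : 1 ≤ t) (h2 : t < g.length) (i : Nat) :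
    rowAt (aStep1 g (t : Int)) i =
      if i = t - 1 then (rowAt g (t - 1)).dropLast
      else if i = t then rowAt g t ++ [lastD (rowAt g (t - 1))]
      else rowAt g i := by
  have e : (t : Int) - 1 = ((t - 1 : Nat) : Int) := by omega
  simp only [aStep1, e, PySem.List.pySetD_natCast, PySem.List.pyGetD_natCast]
  simp only [rowAt, lastD, getD_set]
  simp only [List.length_set]
  split_ifs <;> (try omega) <;> subst_vars <;> try rfl


theorem aStep2_rowAt (g : List (List Int)) (t : Nat) (h2 : t + 1 < g.length) (i : Nat) :
    rowAt (aStep2 g (t : Int)) i =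
      if i = t then headD (rowAt g (t + 1)) :: rowAt g t
      else if i = t + 1 then (rowAt g (t + 1)).tail
      else rowAt g i := by
  have e : (t : Int) + 1 = ((t + 1 : Nat) : Int) := by omega
  simp only [aStep2, e, PySem.List.pySetD_natCast, PySem.List.pyGetD_natCast]
  simp only [rowAt, headD, getD_set]
  simp only [List.length_set]
  split_ifs <;> (try omega) <;> subst_vars <;> try rfl


theorem L1_char (t : Nat) (g : List (List Int)) (ht : t < g.length) (i : Nat) :
    rowAt ((PySem.List.pyRange (t : Int) 0 (-1)).foldl aStep1 g) i = row1 g t i := by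
  induction t generalizing g with
  | zero =>
      rw [PySem.List.pyRange_neg_one_eq_nil (by omega)]
      simp [row1]
  | succ t ih =>
      rw [PySem.List.pyRange_neg_one_cons (by push_cast; omega)]
      have e : ((t : Int) + 1) - 1 = (t : Int) := by omega
      push_cast
      rw [List.foldl_cons, e]
      have hlen : t < (aStep1 g ((t : Int) + 1)).length := by rw [aStep1_len]; omega
      have e2 : ((t : Int) + 1) = (((t + 1 : Nat)) : Int) := by omega
      rw [ih _ hlen]
      -- now compare row1 (aStep1 g (t+1)) t i with row1 g (t+1) i
      have hs : ∀ j, rowAt (aStep1 g ((t : Int) + 1)) j =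
          if j = t then (rowAt g t).dropLast
          else if j = t + 1 then rowAt g (t + 1) ++ [lastD (rowAt g t)]
          else rowAt g j := by
        intro j
        have := aStep1_rowAt g (t + 1) (by omega) (by omega) j
        rw [e2]; rw [this]; simp
      simp only [row1, hs]
      split_ifs <;> (try contradiction) <;> (try omega) <;> subst_vars <;> try rfl


theorem L2_char (t : Nat) (g : List (List Int)) (ht : t < g.length) (i : Nat) :
    rowAt ((PySem.List.pyRange 0 (t : Int) 1).foldl aStep2 g) i = row2 g t i := by
  induction t generalizing i with
  | zero =>
      rw [PySem.List.pyRange_one_eq_nil (by omega)]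
      simp [row2]
  | succ t ih =>
      have e2 : ((t + 1 : Nat) : Int) = (t : Int) + 1 := by omega
      rw [e2, PySem.List.pyRange_one_succ_right (by omega), List.foldl_append]
      simp only [List.foldl_cons, List.foldl_nil]
      have hfl : ((PySem.List.pyRange 0 (t : Int) 1).foldl aStep2 g).length = g.length :=
        foldl2_len _ _
      have hs := aStep2_rowAt ((PySem.List.pyRange 0 (t : Int) 1).foldl aStep2 g) t
        (by rw [hfl]; omega)
      rw [hs i]
      have iht := fun j => ih (by omega) (i := j)
      simp only [iht]
      simp only [row2]
      split_ifs <;> (try contradiction) <;> (try omega) <;> subst_vars <;> try rfl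


theorem getD_eq_rowAt (g : List (List Int)) (i : Nat) : g.getD i [] = rowAt g i := rfl

theorem rowAt_eq_getElem (g : List (List Int)) (i : Nat) (h : i < g.length) : rowAt g i = g[i] := by
  simp [rowAt, List.getD, List.getElem?_eq_getElem h]

theorem rowAt_mem (g : List (List Int)) (i : Nat) (h : i < g.length) : rowAt g i ∈ g := by
  rw [rowAt_eq_getElem g i h]; exact List.getElem_mem h

theorem pyGetD_neg_one_lastD (r : List Int) (h : r ≠ []) : PySem.List.pyGetD r (-1) 0 = lastD r := by
  rw [PySem.List.pyGetD_neg_one r 0 h, lastD, List.getLast?_eq_some_getLast h]; rfl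

theorem pyGetD_zero_headD (r : List Int) : PySem.List.pyGetD r 0 0 = headD r := by
  cases r <;> simp [PySem.List.pyGetD_zero, headD, List.getD]

theorem slice_one_neg_one (r : List Int) (h : 2 ≤ r.length) :
    PySem.List.slice r (some 1) (some (-1)) = r.tail.dropLast := by
  simp [PySem.List.slice]
  rw [show min 1 r.length = 1 by omega, List.drop_one, List.dropLast_eq_take, List.length_tail]

theorem headD_dropLast_append (r : List Int) (c : Int) (h : 2 ≤ r.length) :
    headD (r.dropLast ++ [c]) = headD r := by
  cases r with
  | nil => simp at h
  | cons a t => cases t <;> simp_all [headD]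

theorem headD_append (r : List Int) (c : Int) (h : r ≠ []) : headD (r ++ [c]) = headD r := by
  cases r <;> simp_all [headD]

theorem tail_dropLast_append (r : List Int) (c : Int) (h : 2 ≤ r.length) :
    (r.dropLast ++ [c]).tail = r.tail.dropLast ++ [c] := by
  cases r with
  | nil => simp at h
  | cons a t => cases t <;> simp_all

theorem tail_append_singleton (r : List Int) (c : Int) (h : r ≠ []) :
    (r ++ [c]).tail = r.tail ++ [c] := by
  cases r <;> simp_all

theorem rotEq (g : List (List Int)) (hn : 2 ≤ g.length) (hr : ∀ r ∈ g, 2 ≤ r.length) :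
    aOp g "Rotate" = bRotate g := by
  have hrow : ∀ j, j < g.length → 2 ≤ (rowAt g j).length := fun j hj => hr _ (rowAt_mem g j hj)
  have hne : ∀ j, j < g.length → rowAt g j ≠ [] := by
    intro j hj hc; have := hrow j hj; simp [hc] at this
  have ecast : ((g.length : Int) - 1) = ((g.length - 1 : Nat) : Int) := by omega
  simp only [aOp, String.reduceEq, reduceIte, ecast]
  set G1 := (PySem.List.pyRange ((g.length - 1 : Nat) : Int) 0 (-1)).foldl aStep1 g with hG1
  have hG1len : G1.length = g.length := foldl1_len _ _
  have hL1 : ∀ j, rowAt G1 j = row1 g (g.length - 1) j := L1_char (g.length - 1) g (by omega)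
  have ecast2 : ((G1.length : Int) - 1) = ((g.length - 1 : Nat) : Int) := by omega
  rw [ecast2]
  set L := (PySem.List.pyRange 0 ((g.length - 1 : Nat) : Int) 1).foldl aStep2 G1 with hL
  have hLlen : L.length = g.length := by rw [hL, foldl2_len, hG1len]
  have hL2 : ∀ i, rowAt L i = row2 G1 (g.length - 1) i :=
    L2_char (g.length - 1) G1 (by omega)
  -- rows after A's first loop
  have hA0 : rowAt G1 0 = (rowAt g 0).dropLast := by
    rw [hL1]; simp only [row1]; rw [if_neg (by omega)]; simp only [reduceIte]
  have hAmid : ∀ j, 1 ≤ j → j < g.length - 1 →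
      rowAt G1 j = (rowAt g j).dropLast ++ [lastD (rowAt g (j - 1))] := by
    intro j h1 h2
    rw [hL1]; simp only [row1]; rw [if_neg (by omega), if_neg (by omega), if_pos h2]
  have hAlast : rowAt G1 (g.length - 1) =
      rowAt g (g.length - 1) ++ [lastD (rowAt g (g.length - 1 - 1))] := by
    rw [hL1]; simp only [row1]
    rw [if_neg (by omega), if_neg (by omega), if_neg (by omega)]; simp only [reduceIte]
  -- head of row j of G1, for 1 ≤ j ≤ n-1
  have hAhead : ∀ j, 1 ≤ j → j ≤ g.length - 1 → headD (rowAt G1 j) = headD (rowAt g j) := by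
    intro j h1 h2
    by_cases hj : j < g.length - 1
    · rw [hAmid j h1 hj, headD_dropLast_append _ _ (hrow j (by omega))]
    · have : j = g.length - 1 := by omega
      subst this
      rw [hAlast, headD_append _ _ (hne _ (by omega))]
  -- rows after A's second loop, in terms of the original rows
  have hfin0 : rowAt L 0 = headD (rowAt g 1) :: (rowAt g 0).dropLast := by
    rw [hL2]; simp only [row2]
    rw [if_neg (by omega), if_pos (by omega)]; simp only [reduceIte]
    rw [hAhead 1 (by omega) (by omega), hA0]
  have hfinmid : ∀ i, 1 ≤ i → i < g.length - 1 →
      rowAt L i = headD (rowAt g (i + 1)) :: ((rowAt g i).tail.dropLast ++ [lastD (rowAt g (i - 1))]) := by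
    intro i h1 h2
    rw [hL2]; simp only [row2]
    rw [if_neg (by omega), if_pos h2, if_neg (by omega), hAhead (i + 1) (by omega) (by omega),
      hAmid i h1 h2, tail_dropLast_append _ _ (hrow i (by omega))]
  have hfinlast : rowAt L (g.length - 1) =
      (rowAt g (g.length - 1)).tail ++ [lastD (rowAt g (g.length - 1 - 1))] := by
    rw [hL2]; simp only [row2]
    rw [if_neg (by omega), if_neg (by omega)]; simp only [reduceIte]
    rw [hAlast, tail_append_singleton _ _ (hne _ (by omega))]
  -- now compare with bRotate g elementwise
  apply List.ext_getElem
  · rw [hLlen]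
    simp only [bRotate, List.length_cons, List.length_append, List.length_map,
      PySem.List.length_pyRange_one, List.length_nil]
    omega
  · intro i hi1 hi2
    rw [hLlen] at hi1
    rw [← rowAt_eq_getElem L i (by omega)]
    -- right-hand side element
    simp only [bRotate]
    rcases Nat.eq_zero_or_pos i with h0 | hipos
    · subst h0
      rw [List.getElem_cons_zero, hfin0]
      rw [PySem.List.pyGetD_ofNat' g 1 [], getD_eq_rowAt, pyGetD_zero_headD,
        PySem.List.pyGetD_zero g, getD_eq_rowAt, PySem.List.slice_to_neg_one]
    · obtain ⟨j, rfl⟩ : ∃ j, i = j + 1 := ⟨i - 1, by omega⟩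
      rw [List.getElem_cons_succ]
      by_cases hlast : j + 1 = g.length - 1
      · rw [List.getElem_append_right (by simp [PySem.List.length_pyRange_one]; omega)]
        simp only [List.length_map, PySem.List.length_pyRange_one]
        rw [List.getElem_singleton, hlast, hfinlast]
        have e1 : ((g.length : Int) - 1) = ((g.length - 1 : Nat) : Int) := by omega
        have e2 : ((g.length : Int) - 2) = ((g.length - 2 : Nat) : Int) := by omega
        rw [e1, e2, PySem.List.pyGetD_natCast, PySem.List.pyGetD_natCast,
          PySem.List.slice_from_one, getD_eq_rowAt, getD_eq_rowAt,
          pyGetD_neg_one_lastD _ (hne _ (by omega))]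
        have e3 : g.length - 1 - 1 = g.length - 2 := by omega
        rw [e3]
      · rw [List.getElem_append_left (by simp [PySem.List.length_pyRange_one]; omega)]
        rw [List.getElem_map, PySem.List.getElem_pyRange_one]
        rw [hfinmid (j + 1) (by omega) (by omega)]
        have e1 : (1 : Int) + (j : Int) + 1 = (((j + 2 : Nat)) : Int) := by omega
        have e2 : (1 : Int) + (j : Int) = (((j + 1 : Nat)) : Int) := by omega
        have e3 : (1 : Int) + (j : Int) - 1 = ((j : Nat) : Int) := by omega
        rw [e3, e1, e2, PySem.List.pyGetD_natCast, PySem.List.pyGetD_natCast,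
          PySem.List.pyGetD_natCast, getD_eq_rowAt, getD_eq_rowAt, getD_eq_rowAt,
          pyGetD_zero_headD, slice_one_neg_one _ (hrow (j + 1) (by omega)),
          pyGetD_neg_one_lastD _ (hne j (by omega))]
        have e4 : j + 1 + 1 = j + 2 := by omega
        have e5 : j + 1 - 1 = j := by omega
        rw [e4, e5]

theorem shiftEq (g : List (List Int)) (h : g ≠ []) : aOp g "ShiftRow" = bOp g "ShiftRow" := by
  simp only [aOp, bOp, String.reduceEq, reduceIte]
  rw [List.getLast?_eq_some_getLast h]
  rw [PySem.List.slice_from_neg_one, PySem.List.slice_to_neg_one, List.drop_length_sub_one h]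
  rfl

theorem rotSmallA (g : List (List Int)) (h : g.length ≤ 1) : aOp g "Rotate" = g := by
  simp only [aOp, String.reduceEq, reduceIte]
  rw [PySem.List.pyRange_neg_one_eq_nil (by omega), List.foldl_nil,
    PySem.List.pyRange_one_eq_nil (by omega), List.foldl_nil]

theorem bOp_length (g : List (List Int)) (op : String) : (bOp g op).length = g.length := by
  by_cases h1 : op = "ShiftRow"
  · subst h1
    simp only [bOp, String.reduceEq, reduceIte]
    rw [PySem.List.slice_from_neg_one, PySem.List.slice_to_neg_one]
    simp only [List.length_append, List.length_drop, List.length_dropLast]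
    omega
  · by_cases h2 : op = "Rotate" ∧ 2 ≤ g.length ∧ 2 ≤ (PySem.List.pyGetD g 0 []).length
    · rw [bOp, if_neg h1, if_pos h2]
      simp only [bRotate, List.length_cons, List.length_append, List.length_map,
        PySem.List.length_pyRange_one, List.length_nil]
      omega
    · rw [bOp, if_neg h1, if_neg h2]

theorem bOp_rows (g : List (List Int)) (op : String) (h : ∀ r ∈ g, 2 ≤ r.length) :
    ∀ r ∈ bOp g op, 2 ≤ r.length := by
  by_cases h1 : op = "ShiftRow"
  · subst h1
    simp only [bOp, String.reduceEq, reduceIte]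
    intro r hr
    rcases List.mem_append.mp hr with hm | hm
    · exact h r (PySem.List.mem_of_mem_slice _ _ _ hm)
    · exact h r (PySem.List.mem_of_mem_slice _ _ _ hm)
  · by_cases h2 : op = "Rotate" ∧ 2 ≤ g.length ∧ 2 ≤ (PySem.List.pyGetD g 0 []).length
    · rw [bOp, if_neg h1, if_pos h2]
      obtain ⟨-, hn, h0⟩ := h2
      intro r hr
      simp only [bRotate, List.mem_cons, List.mem_append, List.mem_map] at hr
      rcases hr with rfl | ⟨x, -, rfl⟩ | rfl | hm
      · simp only [List.length_cons, PySem.List.slice_to_neg_one, List.length_dropLast]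
        omega
      · simp only [List.length_cons, List.length_append]
        omega
      · simp only [List.length_append, List.length_singleton, PySem.List.slice_from_one,
          List.length_tail]
        have hlt : g.length - 1 < g.length := by omega
        have : 2 ≤ (rowAt g (g.length - 1)).length := h _ (rowAt_mem g _ hlt)
        have ec : ((g.length : Int) - 1) = ((g.length - 1 : Nat) : Int) := by omega
        rw [ec, PySem.List.pyGetD_natCast, getD_eq_rowAt]
        omega
      · simp at hm
    · rw [bOp, if_neg h1, if_neg h2]
      exact h

theorem opEq (g : List (List Int)) (op : String)
    (hS : op = "ShiftRow" → g ≠ [])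
    (hR : op = "Rotate" → g.length ≤ 1 ∨ ∀ r ∈ g, 2 ≤ r.length) :
    aOp g op = bOp g op := by
  by_cases h1 : op = "ShiftRow"
  · subst h1; exact shiftEq g (hS rfl)
  · by_cases h2 : op = "Rotate"
    · subst h2
      by_cases hn : g.length ≤ 1
      · rw [rotSmallA g hn, bOp, if_neg h1, if_neg (by intro hc; omega)]
      · rcases hR rfl with hle | hrows
        · omega
        · have hguard : ("Rotate" : String) = "Rotate" ∧ 2 ≤ g.length ∧
              2 ≤ (PySem.List.pyGetD g 0 []).length := by
            refine ⟨rfl, by omega, ?_⟩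
            rw [PySem.List.pyGetD_zero, getD_eq_rowAt]
            exact hrows _ (rowAt_mem g 0 (by omega))
          rw [rotEq g (by omega) hrows, bOp, if_neg h1, if_pos hguard]
    · simp [aOp, bOp, h1, h2]

theorem foldEq (ops : List String) (g : List (List Int))
    (hS : "ShiftRow" ∈ ops → g ≠ [])
    (hR : "Rotate" ∈ ops → g.length ≤ 1 ∨ ∀ r ∈ g, 2 ≤ r.length) :
    ops.foldl aOp g = ops.foldl bOp g := by
  induction ops generalizing g with
  | nil => rfl
  | cons op rest ih =>
      rw [List.foldl_cons, List.foldl_cons,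
        opEq g op (fun h => hS (by simp [h])) (fun h => hR (by simp [h]))]
      apply ih
      · intro hm
        have hg : g ≠ [] := hS (by simp [hm])
        have := bOp_length g op
        intro hc; rw [hc] at this; simp at this
        exact hg (List.eq_nil_of_length_eq_zero this.symm)
      · intro hm
        rcases hR (by simp [hm]) with hle | hrows
        · left; rw [bOp_length]; exact hle
        · right; exact bOp_rows g op hrows

theorem solution_spec : Claim_equal_solution := by
  intro rc operations _ hpre
  unfold Spec_solution solution solution_alt
  exact foldEq operations rc hpre.1 hpre.2
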